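-- pv_equiv track=rewrite | github.com/Daria976/-2-1-5- | depvis_stage3.py | bfs_dependencies
-- ===== SOURCE A (Python) =====
-- from collections import deque, defaultdict
--
-- def bfs_dependencies(graph, start):
--     visited = set()
--     queue = deque([start])
--     order = []
--
--     while queue:
--         node = queue.popleft()
--         if node in visited:
--             continue
--         visited.add(node)
--         order.append(node)
--
--         for dep in graph.get(node, []):
--             if dep not in visited:
--                 queue.append(dep)
--     return order
-- ===== SOURCE B (Python) =====
-- def bfs_dependencies(graph, start):
--     visited = set()
--     order = []
--     frontier = [start]
--     while frontier:
--         next_frontier = []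
--         for node in frontier:
--             if node in visited:
--                 continue
--             visited.add(node)
--             order.append(node)
--             for dep in graph.get(node, []):
--                 if dep not in visited:
--                     next_frontier.append(dep)
--         frontier = next_frontier
--     return order
-- ===== Notes on version B (the rewrite author's own statement) =====
-- stated objective: alternative
-- what changed: Replaces the single deque/popleft queue loop with a level-synchronous BFS: an outer loop over successive frontier lists and an inner loop that builds the next frontier, with the visited check kept at consume time so the emitted order is identical.
import Mathlib
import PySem

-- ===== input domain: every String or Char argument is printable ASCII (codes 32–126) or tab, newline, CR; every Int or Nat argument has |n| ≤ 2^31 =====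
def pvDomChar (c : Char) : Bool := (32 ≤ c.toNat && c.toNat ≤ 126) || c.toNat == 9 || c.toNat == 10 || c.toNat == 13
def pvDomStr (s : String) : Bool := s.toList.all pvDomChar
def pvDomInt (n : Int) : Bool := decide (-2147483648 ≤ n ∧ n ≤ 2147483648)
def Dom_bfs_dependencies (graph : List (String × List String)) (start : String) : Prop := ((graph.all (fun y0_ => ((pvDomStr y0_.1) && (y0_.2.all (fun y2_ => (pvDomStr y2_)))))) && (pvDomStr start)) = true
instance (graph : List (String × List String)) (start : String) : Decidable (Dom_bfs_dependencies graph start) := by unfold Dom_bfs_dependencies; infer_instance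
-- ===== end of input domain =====

-- B replaces A's single deque/popleft loop by a level-synchronous BFS (outer loop over
-- frontier lists, inner fold building the next frontier); same output, proved equal.


-- ===== PORT A =====

-- graph.get(node, [])
def pvDeps (graph : List (String × List String)) (node : String) : List String :=
  PySem.Dict.getD ⟨graph⟩ node []

-- termination bookkeeping: the union of all dependency lists, and the number of
-- potential queue elements not yet visited
def pvAll (graph : List (String × List String)) : List String :=
  graph.flatMap Prod.snd

def pvMeas (graph : List (String × List String)) (q : List String) (v : List String) : Nat :=
  ((q.toFinset ∪ (pvAll graph).toFinset) \ v.toFinset).card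

lemma pvDeps_subset (graph : List (String × List String)) (node : String) :
    ∀ x ∈ pvDeps graph node, x ∈ pvAll graph := by
  intro x hx
  unfold pvDeps PySem.Dict.getD PySem.Dict.get? at hx
  cases hfind : List.find? (fun p => p.1 == node) graph with
  | none => simp [hfind] at hx
  | some p =>
    simp [hfind] at hx
    exact List.mem_flatMap.mpr ⟨p, List.mem_of_find?_eq_some hfind, hx⟩

lemma pvMeas_skip (graph : List (String × List String)) (node : String)
    (rest : List String) (v : List String) (h : node ∈ v) :
    pvMeas graph rest v = pvMeas graph (node :: rest) v := by
  unfold pvMeas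
  congr 1
  ext x
  simp only [Finset.mem_sdiff, Finset.mem_union, List.mem_toFinset, List.mem_cons]
  constructor
  · rintro ⟨hl, hr⟩; exact ⟨by tauto, hr⟩
  · rintro ⟨hl, hr⟩
    refine ⟨?_, hr⟩
    rcases hl with (rfl | h') | h'
    · exact absurd h hr
    · exact Or.inl h'
    · exact Or.inr h'

lemma pvMeas_proc (graph : List (String × List String)) (node : String)
    (rest app v : List String) (hnode : node ∉ v)
    (happ : ∀ x ∈ app, x ∈ pvAll graph) :
    pvMeas graph (rest ++ app) (v ++ [node]) < pvMeas graph (node :: rest) v := by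
  unfold pvMeas
  apply Finset.card_lt_card
  rw [Finset.ssubset_iff_of_subset]
  · refine ⟨node, ?_, ?_⟩
    · simp [hnode]
    · simp
  · intro x hx
    simp only [Finset.mem_sdiff, Finset.mem_union, List.mem_toFinset, List.mem_append,
      List.mem_cons, List.mem_singleton] at hx ⊢
    rcases hx with ⟨hl, hr⟩
    push_neg at hr
    refine ⟨?_, hr.1⟩
    rcases hl with (h' | h') | h'
    · exact Or.inl (Or.inr h')
    · exact Or.inr (happ x h')
    · exact Or.inr h'

-- the while loop of A: pop from the front of the queue, append unvisited deps at the back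
def pvLoopA (graph : List (String × List String)) :
    List String → PySem.Set String → List String → List String
  | [], _, order => order
  | node :: rest, visited, order =>
    if hv : PySem.Set.contains visited node then
      pvLoopA graph rest visited order
    else
      pvLoopA graph
        (rest ++ (pvDeps graph node).filter
          (fun d => !(PySem.Set.contains (PySem.Set.add visited node) d)))
        (PySem.Set.add visited node) (order ++ [node])
termination_by q v o => (pvMeas graph q v, q.length)
decreasing_by
  · refine Prod.lex_iff.mpr (Or.inr ⟨?_, by simp⟩)
    exact pvMeas_skip graph node rest visited ((PySem.Set.contains_iff _ _).mp hv)
  · refine Prod.lex_iff.mpr (Or.inl ?_)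
    have hnm : node ∉ visited := fun h => hv ((PySem.Set.contains_iff _ _).mpr h)
    have hadd : PySem.Set.add visited node = visited ++ [node] := by
      simp [PySem.Set.add, hnm]
    rw [hadd]
    exact pvMeas_proc graph node rest _ visited hnm
      (fun x hx => pvDeps_subset graph node x (List.mem_filter.mp hx).1)

def bfs_dependencies (graph : List (String × List String)) (start : String) : List String :=
  pvLoopA graph [start] PySem.Set.empty []

-- ===== PORT B =====

-- the body of B's inner 'for node in frontier' loop, folded over the frontier;
-- state = (visited, order, next_frontier)
def pvLevelStep (graph : List (String × List String))
    (acc : PySem.Set String × List String × List String) (node : String) :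
    PySem.Set String × List String × List String :=
  if PySem.Set.contains acc.1 node then acc
  else
    (PySem.Set.add acc.1 node, acc.2.1 ++ [node],
      acc.2.2 ++ (pvDeps graph node).filter
        (fun d => !(PySem.Set.contains (PySem.Set.add acc.1 node) d)))

-- lemmas the outer loop's termination argument needs (cited in decreasing_by)
lemma pvLevel_visited_mono (graph : List (String × List String)) :
    ∀ (f : List String) (acc : PySem.Set String × List String × List String) (x : String),
      x ∈ acc.1 → x ∈ (f.foldl (pvLevelStep graph) acc).1 := by
  intro f
  induction f with
  | nil => intro acc x hx; exact hx
  | cons node rest ih =>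
    intro acc x hx
    simp only [List.foldl_cons]
    apply ih
    unfold pvLevelStep
    split
    · exact hx
    · simp only []
      unfold PySem.Set.add
      split
      · exact hx
      · simp [hx]

lemma pvLevel_mem_frontier (graph : List (String × List String)) :
    ∀ (f : List String) (acc : PySem.Set String × List String × List String) (x : String),
      x ∈ f → x ∈ (f.foldl (pvLevelStep graph) acc).1 := by
  intro f
  induction f with
  | nil => intro acc x hx; exact absurd hx (List.not_mem_nil)
  | cons node rest ih =>
    intro acc x hx
    simp only [List.foldl_cons]
    rcases List.mem_cons.mp hx with rfl | hx'
    · apply pvLevel_visited_mono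
      unfold pvLevelStep
      split
      · exact (PySem.Set.contains_iff _ _).mp (by assumption)
      · simp only []
        unfold PySem.Set.add
        split
        · exact (PySem.Set.contains_iff _ _).mp (by assumption)
        · simp
    · exact ih _ x hx'

lemma pvLevel_next_subset (graph : List (String × List String)) :
    ∀ (f : List String) (acc : PySem.Set String × List String × List String) (x : String),
      x ∈ (f.foldl (pvLevelStep graph) acc).2.2 → x ∈ acc.2.2 ∨ x ∈ pvAll graph := by
  intro f
  induction f with
  | nil => intro acc x hx; exact Or.inl hx
  | cons node rest ih =>
    intro acc x hx
    simp only [List.foldl_cons] at hx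
    rcases ih _ x hx with h | h
    · unfold pvLevelStep at h
      split at h
      · exact Or.inl h
      · simp only [List.mem_append] at h
        rcases h with h | h
        · exact Or.inl h
        · exact Or.inr (pvDeps_subset graph node x (List.mem_filter.mp h).1)
    · exact Or.inr h

lemma pvLevel_all_visited (graph : List (String × List String)) :
    ∀ (f : List String) (acc : PySem.Set String × List String × List String),
      (∀ x ∈ f, x ∈ acc.1) → f.foldl (pvLevelStep graph) acc = acc := by
  intro f
  induction f with
  | nil => intro acc _; rfl
  | cons node rest ih =>
    intro acc h
    simp only [List.foldl_cons]
    have hstep : pvLevelStep graph acc node = acc := by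
      unfold pvLevelStep
      rw [if_pos ((PySem.Set.contains_iff _ _).mpr (h node (List.mem_cons_self)))]
    rw [hstep]
    exact ih acc (fun x hx => h x (List.mem_cons_of_mem _ hx))

lemma pvMeas_level (graph : List (String × List String)) (node : String)
    (rest : List String) (v : PySem.Set String) (o : List String)
    (x : String) (hxf : x ∈ node :: rest) (hxv : x ∉ v) :
    pvMeas graph ((node :: rest).foldl (pvLevelStep graph) (v, o, [])).2.2
        ((node :: rest).foldl (pvLevelStep graph) (v, o, [])).1
      < pvMeas graph (node :: rest) v := by
  unfold pvMeas
  apply Finset.card_lt_card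
  rw [Finset.ssubset_iff_of_subset]
  · refine ⟨x, ?_, ?_⟩
    · simp only [Finset.mem_sdiff, Finset.mem_union, List.mem_toFinset]
      exact ⟨Or.inl hxf, hxv⟩
    · simp only [Finset.mem_sdiff, Finset.mem_union, List.mem_toFinset, not_and, not_not]
      intro _
      exact pvLevel_mem_frontier graph _ _ x hxf
  · intro y hy
    simp only [Finset.mem_sdiff, Finset.mem_union, List.mem_toFinset] at hy ⊢
    rcases hy with ⟨hl, hr⟩
    refine ⟨?_, fun hyv => hr (pvLevel_visited_mono graph _ _ y hyv)⟩
    rcases hl with h | h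
    · rcases pvLevel_next_subset graph _ _ y h with h' | h'
      · exact absurd h' (List.not_mem_nil)
      · exact Or.inr h'
    · exact Or.inr h

lemma pvMeas_all_visited (graph : List (String × List String)) (f v : List String)
    (h : ∀ x ∈ f, x ∈ v) : pvMeas graph [] v = pvMeas graph f v := by
  unfold pvMeas
  congr 1
  apply Finset.ext
  intro y
  simp only [Finset.mem_sdiff, Finset.mem_union, List.mem_toFinset, List.toFinset_nil,
    Finset.notMem_empty, false_or]
  constructor
  · rintro ⟨hl, hr⟩; exact ⟨Or.inr hl, hr⟩
  · rintro ⟨hl, hr⟩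
    refine ⟨?_, hr⟩
    rcases hl with h' | h'
    · exact absurd (h y h') hr
    · exact h'

-- the outer 'while frontier' loop of B
def pvLoopB (graph : List (String × List String)) :
    List String → PySem.Set String → List String → List String
  | [], _, order => order
  | node :: rest, visited, order =>
    let r := (node :: rest).foldl (pvLevelStep graph) (visited, order, [])
    pvLoopB graph r.2.2 r.1 r.2.1
termination_by f v o => (pvMeas graph f v, f.length)
decreasing_by
  by_cases hall : ∀ x ∈ node :: rest, x ∈ visited
  · refine Prod.lex_iff.mpr (Or.inr ⟨?_, ?_⟩)
    · rw [pvLevel_all_visited graph _ _ hall]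
      exact pvMeas_all_visited graph _ _ hall
    · rw [pvLevel_all_visited graph _ _ hall]
      simp
  · push_neg at hall
    obtain ⟨x, hxf, hxv⟩ := hall
    exact Prod.lex_iff.mpr (Or.inl (pvMeas_level graph node rest visited order x hxf hxv))

def bfs_dependencies_alt (graph : List (String × List String)) (start : String) : List String :=
  pvLoopB graph [start] PySem.Set.empty []

-- ===== PRECONDITION & SPEC =====
def Spec_bfs_dependencies (graph : List (String × List String)) (start : String) (out : List String) : Prop := out = bfs_dependencies_alt graph start
instance (graph : List (String × List String)) (start : String) (out : List String) : Decidable (Spec_bfs_dependencies graph start out) := by unfold Spec_bfs_dependencies; infer_instance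

-- ===== CLAIM (what is proved, stated in full; the proofs are below) =====
def Claim_equal_bfs_dependencies : Prop := ∀ (graph : List (String × List String)) (start : String), Dom_bfs_dependencies graph start → Spec_bfs_dependencies graph start (bfs_dependencies graph start)

-- ===== LEMMAS AND PROOFS =====

lemma pvLevelStep_skip (graph : List (String × List String)) (v : PySem.Set String)
    (o nx : List String) (node : String) (h : PySem.Set.contains v node = true) :
    pvLevelStep graph (v, o, nx) node = (v, o, nx) := by
  unfold pvLevelStep
  rw [if_pos h]

lemma pvLevelStep_go (graph : List (String × List String)) (v : PySem.Set String)
    (o nx : List String) (node : String) (h : ¬ PySem.Set.contains v node = true) :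
    pvLevelStep graph (v, o, nx) node =
      (PySem.Set.add v node, o ++ [node],
        nx ++ (pvDeps graph node).filter
          (fun d => !(PySem.Set.contains (PySem.Set.add v node) d))) := by
  unfold pvLevelStep
  rw [if_neg h]

-- A's queue after it has consumed one whole level equals B's state after folding that
-- level: A's queue is (remaining frontier) ++ (accumulated next frontier).
lemma pvLoopA_level (graph : List (String × List String)) :
    ∀ (f : List String) (v : PySem.Set String) (o nxt : List String),
      pvLoopA graph (f ++ nxt) v o =
        pvLoopA graph (f.foldl (pvLevelStep graph) (v, o, nxt)).2.2
          (f.foldl (pvLevelStep graph) (v, o, nxt)).1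
          (f.foldl (pvLevelStep graph) (v, o, nxt)).2.1 := by
  intro f
  induction f with
  | nil => intro v o nxt; rfl
  | cons node rest ih =>
    intro v o nxt
    rw [List.cons_append, pvLoopA, List.foldl_cons]
    by_cases hv : PySem.Set.contains v node
    · rw [dif_pos hv, pvLevelStep_skip graph v o nxt node hv]
      exact ih v o nxt
    · rw [dif_neg hv, pvLevelStep_go graph v o nxt node hv, List.append_assoc]
      exact ih (PySem.Set.add v node) (o ++ [node])
        (nxt ++ (pvDeps graph node).filter
          (fun d => !(PySem.Set.contains (PySem.Set.add v node) d)))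

lemma pvLoopA_eq_pvLoopB (graph : List (String × List String)) :
    ∀ (f : List String) (v : PySem.Set String) (o : List String),
      pvLoopA graph f v o = pvLoopB graph f v o := by
  intro f v o
  induction f, v, o using pvLoopB.induct graph with
  | case1 v o => rw [pvLoopA, pvLoopB]
  | case2 node rest v o r ih =>
    have h := pvLoopA_level graph (node :: rest) v o []
    rw [List.append_nil] at h
    rw [h, ih]
    conv_rhs => rw [pvLoopB]

-- ===== VERDICT (by name: the statement is the Claim_ definition above) =====
theorem bfs_dependencies_spec : Claim_equal_bfs_dependencies := by
  intro graph start _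
  unfold Spec_bfs_dependencies bfs_dependencies bfs_dependencies_alt
  exact pvLoopA_eq_pvLoopB graph [start] PySem.Set.empty []
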